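-- pv_equiv track=rewrite | github.com/Aasthaengg/IBMdataset | Python_codes/p02641/s940219760.py | solve
-- ===== SOURCE A (Python) =====
-- def solve(X: int, N: int, p: "List[int]"):
--     p = set(p)
--     for d in range(0, 100):
--         x = X - d
--         if x not in p:
--             return x
--         x = X + d
--         if x not in p:
--             return x
-- ===== SOURCE B (Python) =====
-- def solve(X: int, N: int, p: "List[int]"):
--     forbidden = set(p)
--     candidates = [x for x in range(X - 99, X + 100) if x not in forbidden]
--     return min(candidates, key=lambda x: (abs(x - X), x), default=None)
-- ===== Notes on version B (the rewrite author's own statement) =====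
-- stated objective: idiomatic
-- what changed: Replaces the expanding outward loop with early returns by one min-by-key over the whole window range(X-99, X+100): filter out forbidden values once, then take min with key (abs(x-X), x), whose tie-break reproduces the X-d-before-X+d preference.
import Mathlib
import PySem

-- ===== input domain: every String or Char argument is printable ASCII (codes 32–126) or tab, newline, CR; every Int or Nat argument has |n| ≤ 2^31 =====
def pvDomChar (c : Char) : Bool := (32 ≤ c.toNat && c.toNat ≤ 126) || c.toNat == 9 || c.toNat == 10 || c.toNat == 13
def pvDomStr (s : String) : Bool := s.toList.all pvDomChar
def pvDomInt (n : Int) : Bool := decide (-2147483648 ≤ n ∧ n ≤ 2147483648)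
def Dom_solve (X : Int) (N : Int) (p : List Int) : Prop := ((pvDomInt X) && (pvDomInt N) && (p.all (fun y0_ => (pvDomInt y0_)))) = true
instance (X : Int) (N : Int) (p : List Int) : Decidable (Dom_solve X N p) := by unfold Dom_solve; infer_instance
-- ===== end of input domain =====

-- B replaces A's expanding outward search (d = 0,1,2,… testing X-d then X+d with early
-- return) by one min-by-key over the whole window [X-99, X+99]: filter the non-forbidden
-- values, then take the minimum under the key (|x-X|, x) — more idiomatic, same cost.

-- ===== PORT A =====
-- the 'for d in range(0, 100)' loop with its two early returns; none = fell off the loop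
def solveGo (pset : PySem.Set Int) (X : Int) : List Int → Option Int
  | [] => none
  | d :: ds =>
      if !(PySem.Set.contains pset (X - d)) then some (X - d)
      else if !(PySem.Set.contains pset (X + d)) then some (X + d)
      else solveGo pset X ds

def solve (X : Int) (N : Int) (p : List Int) : Int :=
  ((solveGo (PySem.Set.ofList p) X (PySem.List.pyRange 0 100 1)).getD 0)

-- ===== PORT B =====
def solve_alt (X : Int) (N : Int) (p : List Int) : Int :=
  let forbidden := PySem.Set.ofList p
  let candidates := (PySem.List.pyRange (X - 99) (X + 100) 1).filter
      (fun x => !(PySem.Set.contains forbidden x))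
  ((PySem.List.min2? candidates (fun x => |x - X|) (fun x => x)).getD 0)

-- ===== PRECONDITION & SPEC =====
-- Pre_ excludes exactly the inputs on which every value of the window [X-99, X+99] is
-- forbidden: there Python A falls off its loop and returns None, not an int.
def Pre_solve (X : Int) (N : Int) (p : List Int) : Prop :=
  ∃ x ∈ PySem.List.pyRange (X - 99) (X + 100) 1, x ∉ p
instance (X : Int) (N : Int) (p : List Int) : Decidable (Pre_solve X N p) := by
  unfold Pre_solve; infer_instance
def pvWitness_solve : Int × Int × List Int := (0, 0, [])

def Spec_solve (X : Int) (N : Int) (p : List Int) (out : Int) : Prop := out = solve_alt X N p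
instance (X : Int) (N : Int) (p : List Int) (out : Int) : Decidable (Spec_solve X N p out) := by unfold Spec_solve; infer_instance

-- ===== CLAIM (what is proved, stated in full; the proofs are below) =====
def Claim_equal_solve : Prop := ∀ (X : Int) (N : Int) (p : List Int), Dom_solve X N p → Pre_solve X N p → Spec_solve X N p (solve X N p)

-- ===== LEMMAS AND PROOFS =====

-- the strict lexicographic order min2?'s fold step tests, as a Prop
def Lt2 (k1 k2 : Int → Int) (y m : Int) : Prop :=
  k1 y < k1 m ∨ (¬ k1 m < k1 y ∧ k2 y < k2 m)

lemma nLt2_trans (k1 k2 : Int → Int) {a b c : Int}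
    (h1 : ¬ Lt2 k1 k2 a b) (h2 : ¬ Lt2 k1 k2 b c) : ¬ Lt2 k1 k2 a c := by
  unfold Lt2 at *; omega

lemma Lt2_irrefl (k1 k2 : Int → Int) (a : Int) : ¬ Lt2 k1 k2 a a := by
  unfold Lt2; omega

def minStep (k1 k2 : Int → Int) (acc : Option Int) (x : Int) : Option Int :=
  match acc with
  | none => some x
  | some m =>
      if (decide (k1 x < k1 m) || !decide (k1 m < k1 x) && decide (k2 x < k2 m)) = true
      then some x else some m

lemma min2?_eq_foldl_minStep (k1 k2 : Int → Int) (xs : List Int) :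
    PySem.List.min2? xs k1 k2 = xs.foldl (minStep k1 k2) none := by
  unfold PySem.List.min2?
  congr 1
  funext acc x
  cases acc <;> rfl

lemma minGo (k1 k2 : Int → Int) : ∀ (xs : List Int) (a : Int),
    ∃ m, xs.foldl (minStep k1 k2) (some a) = some m
      ∧ (m = a ∨ m ∈ xs)
      ∧ ¬ Lt2 k1 k2 a m
      ∧ ∀ y ∈ xs, ¬ Lt2 k1 k2 y m := by
  intro xs
  induction xs with
  | nil => intro a; exact ⟨a, rfl, Or.inl rfl, Lt2_irrefl k1 k2 a, by simp⟩
  | cons x xs ih =>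
      intro a
      by_cases hg : Lt2 k1 k2 x a
      · have hgb : (decide (k1 x < k1 a) || !decide (k1 a < k1 x) && decide (k2 x < k2 a)) = true := by
          unfold Lt2 at hg; simp; omega
        obtain ⟨m, hm, hmem, hax, hall⟩ := ih x
        refine ⟨m, ?_, ?_, ?_, ?_⟩
        · rw [List.foldl_cons]
          simpa [minStep, hgb] using hm
        · rcases hmem with h | h
          · exact Or.inr (by simp [h])
          · exact Or.inr (by simp [h])
        · have hax2 : ¬ Lt2 k1 k2 a x := by unfold Lt2 at *; omega
          exact nLt2_trans k1 k2 hax2 hax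
        · intro y hy
          rcases List.mem_cons.mp hy with h | hy
          · exact h ▸ hax
          · exact hall y hy
      · have hgb : (decide (k1 x < k1 a) || !decide (k1 a < k1 x) && decide (k2 x < k2 a)) = false := by
          unfold Lt2 at hg; simp; omega
        obtain ⟨m, hm, hmem, haa, hall⟩ := ih a
        refine ⟨m, ?_, ?_, haa, ?_⟩
        · rw [List.foldl_cons]
          simpa [minStep, hgb] using hm
        · rcases hmem with h | h
          · exact Or.inl h
          · exact Or.inr (by simp [h])
        · intro y hy
          rcases List.mem_cons.mp hy with h | hy
          · exact h ▸ (nLt2_trans k1 k2 hg haa)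
          · exact hall y hy

lemma min2?_cons_spec (k1 k2 : Int → Int) (x : Int) (xs : List Int) :
    ∃ m, PySem.List.min2? (x :: xs) k1 k2 = some m ∧ m ∈ (x :: xs)
      ∧ ∀ y ∈ (x :: xs), ¬ Lt2 k1 k2 y m := by
  obtain ⟨m, hm, hmem, hx, hall⟩ := minGo k1 k2 xs x
  refine ⟨m, ?_, ?_, ?_⟩
  · rw [min2?_eq_foldl_minStep, List.foldl_cons]
    simpa [minStep] using hm
  · rcases hmem with h | h
    · simp [h]
    · simp [h]
  · intro y hy
    rcases List.mem_cons.mp hy with h | hy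
    · exact h ▸ hx
    · exact hall y hy

-- not-in-set test as membership in p
lemma contains_false_iff (p : List Int) (x : Int) :
    (PySem.Set.contains (PySem.Set.ofList p) x = false) ↔ x ∉ p := by
  simp [PySem.Set.contains, PySem.Set.mem_ofList]

lemma contains_true_iff (p : List Int) (x : Int) :
    (PySem.Set.contains (PySem.Set.ofList p) x = true) ↔ x ∈ p := by
  simp [PySem.Set.contains, PySem.Set.mem_ofList]

-- invariant-based characterisation of A's outward loop (distances via natAbs for omega)
lemma loopA (X : Int) (p : List Int) : ∀ (n : Nat) (d0 : Int), d0 = 100 - (n : Int) → 0 ≤ d0 →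
    (∀ z : Int, ((z - X).natAbs : Int) < d0 → z ∈ p) →
    (match solveGo (PySem.Set.ofList p) X (PySem.List.pyRange d0 100 1) with
    | some m => (((m - X).natAbs : Int) ≤ 99 ∧ m ∉ p) ∧
        ∀ y : Int, ((y - X).natAbs : Int) ≤ 99 → y ∉ p →
          (((m - X).natAbs : Int) < ((y - X).natAbs : Int) ∨
            (((m - X).natAbs : Int) = ((y - X).natAbs : Int) ∧ m ≤ y))
    | none => ∀ z : Int, ((z - X).natAbs : Int) ≤ 99 → z ∈ p) := by
  intro n
  induction n with
  | zero =>
      intro d0 hd0 _ hprev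
      have hnil : PySem.List.pyRange d0 100 1 = [] := by
        rw [PySem.List.pyRange_one]
        have : (100 - d0).toNat = 0 := by omega
        simp [this]
      rw [hnil]
      simp only [solveGo]
      intro z hz; exact hprev z (by omega)
  | succ n ih =>
      intro d0 hd0 hd0nn hprev
      have hlt : d0 < 100 := by omega
      rw [PySem.List.pyRange_one_cons hlt]
      simp only [solveGo]
      cases h1 : PySem.Set.contains (PySem.Set.ofList p) (X - d0) with
      | false =>
          simp only [Bool.not_false, if_true]
          constructor
          · exact ⟨by omega, (contains_false_iff p _).mp h1⟩
          · intro y hy hynp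
            have hyd : ¬ (((y - X).natAbs : Int) < d0) := fun hc => hynp (hprev y hc)
            by_cases heq : ((y - X).natAbs : Int) = d0
            · right; constructor
              · omega
              · omega
            · left; omega
      | true =>
          simp only [Bool.not_true, Bool.false_eq_true, if_false]
          have hmem1 : X - d0 ∈ p := (contains_true_iff p _).mp h1
          cases h2 : PySem.Set.contains (PySem.Set.ofList p) (X + d0) with
          | false =>
              simp only [Bool.not_false, if_true]
              constructor
              · exact ⟨by omega, (contains_false_iff p _).mp h2⟩
              · intro y hy hynp
                have hyd : ¬ (((y - X).natAbs : Int) < d0) := fun hc => hynp (hprev y hc)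
                by_cases heq : ((y - X).natAbs : Int) = d0
                · right; constructor
                  · omega
                  · have : y = X - d0 ∨ y = X + d0 := by omega
                    rcases this with h | h
                    · exact absurd (h ▸ hmem1) hynp
                    · omega
                · left; omega
          | true =>
              simp only [Bool.not_true, Bool.false_eq_true, if_false]
              have hmem2 : X + d0 ∈ p := (contains_true_iff p _).mp h2
              have hnext : ∀ z : Int, ((z - X).natAbs : Int) < d0 + 1 → z ∈ p := by
                intro z hz
                by_cases hc : ((z - X).natAbs : Int) < d0
                · exact hprev z hc
                · have : z = X - d0 ∨ z = X + d0 := by omega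
                  rcases this with h | h
                  · exact h ▸ hmem1
                  · exact h ▸ hmem2
              exact ih (d0 + 1) (by omega) (by omega) hnext

-- candidate-list membership for B
lemma mem_candidates (X : Int) (p : List Int) (x : Int) :
    x ∈ (PySem.List.pyRange (X - 99) (X + 100) 1).filter
        (fun x => !(PySem.Set.contains (PySem.Set.ofList p) x))
      ↔ (((x - X).natAbs : Int) ≤ 99 ∧ x ∉ p) := by
  rw [List.mem_filter]
  rw [PySem.List.mem_pyRange_one]
  constructor
  · rintro ⟨hr, hc⟩
    refine ⟨by omega, ?_⟩
    have hcf : PySem.Set.contains (PySem.Set.ofList p) x = false := by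
      cases hb : PySem.Set.contains (PySem.Set.ofList p) x with
      | false => rfl
      | true => rw [hb] at hc; simp at hc
    exact (contains_false_iff p x).mp hcf
  · rintro ⟨hr, hnp⟩
    refine ⟨by omega, ?_⟩
    rw [(contains_false_iff p x).mpr hnp]
    rfl

-- ===== VERDICT (by name: the statement is the Claim_ definition above) =====
theorem solve_spec : Claim_equal_solve := by
  intro X N p _ hpre
  unfold Spec_solve
  obtain ⟨w, hwmem, hwnp⟩ := hpre
  rw [PySem.List.mem_pyRange_one] at hwmem
  have hwgood : (((w - X).natAbs : Int) ≤ 99 ∧ w ∉ p) := ⟨by omega, hwnp⟩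
  have hA := loopA X p 100 0 (by norm_num) le_rfl (by intro z hz; exfalso; omega)
  unfold solve
  cases hres : solveGo (PySem.Set.ofList p) X (PySem.List.pyRange 0 100 1) with
  | none =>
      rw [hres] at hA
      exact absurd (hA w hwgood.1) hwgood.2
  | some m =>
      rw [hres] at hA
      obtain ⟨⟨hm99, hmnp⟩, hmin⟩ := hA
      unfold solve_alt
      have hwcand : w ∈ (PySem.List.pyRange (X - 99) (X + 100) 1).filter
          (fun x => !(PySem.Set.contains (PySem.Set.ofList p) x)) :=
        (mem_candidates X p w).mpr hwgood
      obtain ⟨c, cs, hcs⟩ := List.exists_cons_of_ne_nil (List.ne_nil_of_mem hwcand)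
      simp only
      rw [hcs]
      obtain ⟨m', hm', hm'mem, hm'all⟩ :=
        min2?_cons_spec (fun x => |x - X|) (fun x => x) c cs
      rw [hm']
      simp only [Option.getD_some]
      have hmcand : m ∈ c :: cs := by
        rw [← hcs]; exact (mem_candidates X p m).mpr ⟨hm99, hmnp⟩
      have hnot := hm'all m hmcand
      have hm'good : (((m' - X).natAbs : Int) ≤ 99 ∧ m' ∉ p) := by
        rw [← hcs] at hm'mem
        exact (mem_candidates X p m').mp hm'mem
      have hkey := hmin m' hm'good.1 hm'good.2
      unfold Lt2 at hnot
      simp only [← Int.natCast_natAbs] at hnot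
      omega
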